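-- pv_equiv track=rewrite | github.com/thymiannne/some-skunk-code | dance_battle.py | dance_battle
-- ===== SOURCE A (Python) =====
-- def dance_battle(energy: int, rivals: list) -> int:
--     honor = 0
--     while rivals:
--         rivals.sort()  # delay
--         win = list(filter(lambda x: energy > x, rivals))
--         lose = list(filter(lambda x: energy <= x, rivals))
--         if len(win) > 0:  # dance
--             energy -= rivals.pop(0)
--             honor += 1
--         elif honor > 0 and len(lose) >= 2:  # recruit
--             energy += rivals.pop()
--             honor -= 1
--         else:  # truce
--             break
--     return honor
-- ===== SOURCE B (Python) =====
-- def dance_battle(energy: int, rivals: list) -> int: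
--     # Sort once, then simulate with two pointers: front = dance target, back = recruit target.
--     arr = sorted(rivals)
--     honor = 0
--     i, j = 0, len(arr) - 1
--     while i <= j:
--         if energy > arr[i]:          # dance the weakest rival
--             energy -= arr[i]
--             i += 1
--             honor += 1
--         elif honor > 0 and i < j:    # recruit the strongest rival
--             energy += arr[j]
--             j -= 1
--             honor -= 1
--         else:                        # truce
--             break
--     return honor
-- ===== Notes on version B (the rewrite author's own statement) =====
-- stated objective: faster
-- what changed: Instead of re-sorting the list and re-filtering winnable/unwinnable rivals on every iteration, B sorts once and simulates the battle with two pointers into the sorted array (front = dance, back = recruit).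
import Mathlib
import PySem

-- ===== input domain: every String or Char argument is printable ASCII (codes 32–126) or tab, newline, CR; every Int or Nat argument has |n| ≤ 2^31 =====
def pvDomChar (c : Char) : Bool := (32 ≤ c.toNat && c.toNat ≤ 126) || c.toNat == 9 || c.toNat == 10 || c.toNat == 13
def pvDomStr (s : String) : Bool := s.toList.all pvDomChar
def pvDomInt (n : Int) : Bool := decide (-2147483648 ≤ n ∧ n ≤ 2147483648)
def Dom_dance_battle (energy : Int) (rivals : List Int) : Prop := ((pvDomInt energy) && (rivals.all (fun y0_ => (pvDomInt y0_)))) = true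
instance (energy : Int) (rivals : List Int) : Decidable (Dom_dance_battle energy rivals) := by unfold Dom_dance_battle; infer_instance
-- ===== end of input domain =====

-- B sorts once and simulates with two pointers (front = dance, back = recruit) instead of
-- re-sorting and re-filtering every iteration: O(n log n) instead of O(n^2 log n).
-- Python A mutates `rivals` in place (sorts and pops it), B does not; the equivalence proved
-- here is about the return value only.

-- ===== PORT A =====
-- A's while loop: re-sort, filter winnable/unwinnable, pop front (dance) / pop back (recruit) / break.
-- rivals.pop(0) = head+tail, rivals.pop() = getLast+dropLast of the sorted list (never empty in those branches).
def dance_battle_loopA (energy honor : Int) (rivals : List Int) : Int :=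
  let s := PySem.List.sorted rivals (fun x => x)
  if hs : s = [] then honor      -- `while rivals:` exits
  else
    let win := s.filter (fun y => decide (energy > y))
    let lose := s.filter (fun y => decide (energy ≤ y))
    if win.length > 0 then
      dance_battle_loopA (energy - s.head hs) (honor + 1) s.tail
    else if honor > 0 ∧ lose.length ≥ 2 then
      dance_battle_loopA (energy + s.getLast hs) (honor - 1) s.dropLast
    else honor
termination_by rivals.length
decreasing_by
  all_goals
    have h1 : (PySem.List.sorted rivals (fun x => x)).length = rivals.length :=
      PySem.List.length_sorted rivals (fun x => x) false
    have h2 : (PySem.List.sorted rivals (fun x => x)).length ≠ 0 :=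
      fun h => hs (List.length_eq_zero_iff.mp h)
    simp only [List.length_tail, List.length_dropLast]
    omega

def dance_battle (energy : Int) (rivals : List Int) : Int :=
  dance_battle_loopA energy 0 rivals

-- ===== PORT B =====
-- B's while loop over two Int indices into the sorted array; arr[i] / arr[j] are always in
-- range on entry (0 ≤ i ≤ j < len), ported with pyGetD (the default is unreachable).
def dance_battle_loopB (arr : List Int) (energy honor i j : Int) : Int :=
  if hij : i ≤ j then
    if energy > PySem.List.pyGetD arr i 0 then
      dance_battle_loopB arr (energy - PySem.List.pyGetD arr i 0) (honor + 1) (i + 1) j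
    else if honor > 0 ∧ i < j then
      dance_battle_loopB arr (energy + PySem.List.pyGetD arr j 0) (honor - 1) i (j - 1)
    else honor
  else honor
termination_by (j + 1 - i).toNat
decreasing_by
  · omega
  · omega

def dance_battle_alt (energy : Int) (rivals : List Int) : Int :=
  let arr := PySem.List.sorted rivals (fun x => x)
  dance_battle_loopB arr energy 0 0 ((arr.length : Int) - 1)

-- ===== PRECONDITION & SPEC =====
def Spec_dance_battle (energy : Int) (rivals : List Int) (out : Int) : Prop := out = dance_battle_alt energy rivals
instance (energy : Int) (rivals : List Int) (out : Int) : Decidable (Spec_dance_battle energy rivals out) := by unfold Spec_dance_battle; infer_instance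

-- ===== CLAIM (what is proved, stated in full; the proofs are below) =====
def Claim_equal_dance_battle : Prop := ∀ (energy : Int) (rivals : List Int), Dom_dance_battle energy rivals → Spec_dance_battle energy rivals (dance_battle energy rivals)

-- ===== LEMMAS AND PROOFS =====

-- Reference loop: B's simulation written over the remaining (sorted) sublist itself.
def loopL (energy honor : Int) (l : List Int) : Int :=
  match l with
  | [] => honor
  | x :: rest =>
    if energy > x then loopL (energy - x) (honor + 1) rest
    else if honor > 0 ∧ rest ≠ [] then
      loopL (energy + (x :: rest).getLast (by simp)) (honor - 1) ((x :: rest).dropLast)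
    else honor
termination_by l.length
decreasing_by
  · simp
  · simp

-- A's loop equals the reference loop on the sorted input.
theorem loopA_eq_loopL : ∀ (n : Nat) (l : List Int), l.length ≤ n → ∀ (e h : Int),
    dance_battle_loopA e h l = loopL e h (PySem.List.sorted l (fun x => x)) := by
  intro n
  induction n with
  | zero =>
    intro l hl e h
    have hnil : l = [] := List.length_eq_zero_iff.mp (Nat.le_zero.mp hl)
    subst hnil
    rw [dance_battle_loopA]
    simp [loopL, show PySem.List.sorted ([] : List Int) (fun x => x) = [] from rfl]
  | succ n ih =>
    intro l hl e h
    rw [dance_battle_loopA]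
    have hp : (PySem.List.sorted l (fun x => x)).Pairwise (fun a b => a ≤ b) :=
      PySem.List.sorted_pairwise l (fun x => x)
    have hlen : (PySem.List.sorted l (fun x => x)).length = l.length :=
      PySem.List.length_sorted l (fun x => x) false
    by_cases hnil : PySem.List.sorted l (fun x => x) = []
    · simp [hnil, loopL]
    · obtain ⟨x, rest, hx⟩ := List.exists_cons_of_ne_nil hnil
      have hxmin : ∀ y ∈ rest, x ≤ y := (List.pairwise_cons.mp (hx ▸ hp)).1
      have hprest : rest.Pairwise (fun a b => a ≤ b) := (List.pairwise_cons.mp (hx ▸ hp)).2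
      have hhead : (PySem.List.sorted l (fun x => x)).head hnil = x := by simp [hx]
      have htail : (PySem.List.sorted l (fun x => x)).tail = rest := by simp [hx]
      have hrlen : rest.length ≤ n := by rw [hx] at hlen; simp at hlen; omega
      rw [dif_neg hnil]
      by_cases hw : e > x
      · have hwin : ((PySem.List.sorted l (fun x => x)).filter (fun y => decide (e > y))).length > 0 := by
          rw [hx]; simp [hw]
        rw [if_pos hwin, hhead, htail, ih rest hrlen,
            PySem.List.sorted_eq_self_of_pairwise rest (fun x => x) hprest, hx, loopL, if_pos hw]
      · have hwin : ¬ ((PySem.List.sorted l (fun x => x)).filter (fun y => decide (e > y))).length > 0 := by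
          rw [hx]
          simp only [List.length_pos_iff, ne_eq, List.filter_eq_nil_iff, not_not, decide_eq_true_eq]
          intro y hy
          rcases List.mem_cons.mp hy with h1 | h1
          · omega
          · have := hxmin y h1; omega
        have hlose : (PySem.List.sorted l (fun x => x)).filter (fun y => decide (e ≤ y))
            = PySem.List.sorted l (fun x => x) := by
          apply List.filter_eq_self.mpr
          intro y hy
          rw [hx] at hy
          rcases List.mem_cons.mp hy with h1 | h1
          · simp; omega
          · have := hxmin y h1; simp; omega
        rw [if_neg hwin, hlose]
        simp only [hx]
        rw [loopL, if_neg hw]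
        have hcond : (h > 0 ∧ (x :: rest).length ≥ 2) ↔ (h > 0 ∧ rest ≠ []) := by
          simp only [List.length_cons, ge_iff_le, ne_eq, ← List.length_pos_iff]
          omega
        by_cases hc : h > 0 ∧ rest ≠ []
        · rw [if_pos (hcond.mpr hc), if_pos hc]
          have hdlp : (x :: rest).dropLast.Pairwise (fun a b => a ≤ b) :=
            (hx ▸ hp).sublist (List.dropLast_sublist _)
          have hdlen : (x :: rest).dropLast.length ≤ n := by simp; omega
          rw [ih _ hdlen, PySem.List.sorted_eq_self_of_pairwise _ (fun x => x) hdlp]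
        · rw [if_neg (fun hh => hc (hcond.mp hh)), if_neg hc]

-- B's index loop equals the reference loop on the slice arr[i : j+1].
theorem loopB_eq_loopL : ∀ (n : Nat) (arr : List Int) (e h : Int) (i j : Int),
    0 ≤ i → j < (arr.length : Int) → (j + 1 - i).toNat ≤ n →
    dance_battle_loopB arr e h i j = loopL e h ((arr.drop i.toNat).take (j + 1 - i).toNat) := by
  intro n
  induction n with
  | zero =>
    intro arr e h i j hi hj hn
    have hij : ¬ i ≤ j := by omega
    rw [dance_battle_loopB, dif_neg hij, show (j + 1 - i).toNat = 0 from by omega]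
    simp [loopL]
  | succ n ih =>
    intro arr e h i j hi hj hn
    rw [dance_battle_loopB]
    by_cases hij : i ≤ j
    · rw [dif_pos hij]
      have hilt : i.toNat < arr.length := by omega
      have hjlt : j.toNat < arr.length := by omega
      have hk : (j + 1 - i).toNat = (j - i).toNat + 1 := by omega
      have hseg : (arr.drop i.toNat).take (j + 1 - i).toNat
          = arr[i.toNat] :: (arr.drop (i.toNat + 1)).take (j - i).toNat := by
        rw [hk, List.drop_eq_getElem_cons hilt, List.take_succ_cons]
      have hai : PySem.List.pyGetD arr i 0 = arr[i.toNat] :=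
        PySem.List.pyGetD_eq_getElem arr 0 hi (by omega)
      have htlen : ((arr.drop (i.toNat + 1)).take (j - i).toNat).length = (j - i).toNat := by
        simp only [List.length_take, List.length_drop]
        omega
      rw [hai, hseg, loopL]
      by_cases hw : e > arr[i.toNat]
      · rw [if_pos hw, if_pos hw, ih arr _ _ (i + 1) j (by omega) hj (by omega),
            show (j + 1 - (i + 1)).toNat = (j - i).toNat from by omega,
            show (i + 1).toNat = i.toNat + 1 from by omega]
      · rw [if_neg hw, if_neg hw]
        have htne : ((arr.drop (i.toNat + 1)).take (j - i).toNat ≠ []) ↔ i < j := by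
          rw [← List.length_pos_iff, htlen]; omega
        by_cases hc : h > 0 ∧ i < j
        · have hc' : h > 0 ∧ (arr.drop (i.toNat + 1)).take (j - i).toNat ≠ [] :=
            ⟨hc.1, htne.mpr hc.2⟩
          rw [if_pos hc, if_pos hc']
          have haj : PySem.List.pyGetD arr j 0 = arr[j.toNat] :=
            PySem.List.pyGetD_eq_getElem arr 0 (by omega) hj
          have hgl : (arr[i.toNat] :: (arr.drop (i.toNat + 1)).take (j - i).toNat).getLast
              (by simp) = arr[j.toNat] := by
            rw [List.getLast_eq_getElem]
            simp only [List.length_cons, htlen, Nat.add_sub_cancel]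
            obtain ⟨m, hm⟩ : ∃ m, (j - i).toNat = m + 1 := ⟨(j - i).toNat - 1, by omega⟩
            simp only [hm, List.getElem_cons_succ, List.getElem_take, List.getElem_drop]
            simp only [show i.toNat + 1 + m = j.toNat from by omega]
          have hdl : (arr[i.toNat] :: (arr.drop (i.toNat + 1)).take (j - i).toNat).dropLast
              = (arr.drop i.toNat).take (j - i).toNat := by
            rw [List.dropLast_eq_take]
            simp only [List.length_cons, htlen, Nat.add_sub_cancel]
            rw [← hseg, List.take_take, min_eq_left (by omega)]
          rw [haj, hgl, hdl, ih arr _ _ i (j - 1) hi (by omega) (by omega),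
              show (j - 1 + 1 - i).toNat = (j - i).toNat from by omega]
        · rw [if_neg hc, if_neg (fun hh => hc ⟨hh.1, htne.mp hh.2⟩)]
    · rw [dif_neg hij, show (j + 1 - i).toNat = 0 from by omega]
      simp [loopL]

-- ===== VERDICT (by name: the statement is the Claim_ definition above) =====
theorem dance_battle_spec : Claim_equal_dance_battle := by
  intro energy rivals _
  unfold Spec_dance_battle dance_battle dance_battle_alt
  rw [loopA_eq_loopL rivals.length rivals le_rfl]
  rw [loopB_eq_loopL (PySem.List.sorted rivals (fun x => x)).length _ energy 0 0
      ((((PySem.List.sorted rivals (fun x => x)).length : Int)) - 1) le_rfl (by omega) (by omega)]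
  have h2 : ((((PySem.List.sorted rivals fun x => x).length : Int)) - 1 + 1 - 0).toNat
      = (PySem.List.sorted rivals fun x => x).length := by omega
  simp only [Int.toNat_zero, List.drop_zero, h2, List.take_length]
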